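-- pv_equiv track=rewrite | github.com/AlexGoncalves21/agentsday-hackathon | agents/organizer/second_brain_agent/compiler.py | _clean_related_slugs
-- ===== SOURCE A (Python) =====
-- from typing import Dict, List
--
-- MAX_RELATED_SLUGS = 6
--
-- def _clean_related_slugs(related_slugs: List[str], page_slug: str, available_slugs: set[str]) -> List[str]:
--     clean = []
--     for related_slug in related_slugs:
--         if related_slug == page_slug or related_slug not in available_slugs or related_slug in clean:
--             continue
--         clean.append(related_slug)
--         if len(clean) == MAX_RELATED_SLUGS:
--             break
--     return clean
-- ===== SOURCE B (Python) =====
-- MAX_RELATED_SLUGS = 6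
--
-- def _clean_related_slugs(related_slugs, page_slug, available_slugs):
--     def go(rest, budget):
--         if budget == 0 or not rest:
--             return []
--         head, tail = rest[0], rest[1:]
--         if head == page_slug or head not in available_slugs:
--             return go(tail, budget)
--         return [head] + go([s for s in tail if s != head], budget - 1)
--     return go(related_slugs, MAX_RELATED_SLUGS)
-- ===== Notes on version B (the rewrite author's own statement) =====
-- stated objective: alternative
-- what changed: A's imperative loop with an accumulator, an in-loop 'already in clean' membership test and an early break at 6 becomes a recursion with an explicit budget counter that deduplicates by filtering all future duplicates out of the remaining tail when an element is kept, so no accumulator or output-membership test exists at all.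
import Mathlib
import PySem

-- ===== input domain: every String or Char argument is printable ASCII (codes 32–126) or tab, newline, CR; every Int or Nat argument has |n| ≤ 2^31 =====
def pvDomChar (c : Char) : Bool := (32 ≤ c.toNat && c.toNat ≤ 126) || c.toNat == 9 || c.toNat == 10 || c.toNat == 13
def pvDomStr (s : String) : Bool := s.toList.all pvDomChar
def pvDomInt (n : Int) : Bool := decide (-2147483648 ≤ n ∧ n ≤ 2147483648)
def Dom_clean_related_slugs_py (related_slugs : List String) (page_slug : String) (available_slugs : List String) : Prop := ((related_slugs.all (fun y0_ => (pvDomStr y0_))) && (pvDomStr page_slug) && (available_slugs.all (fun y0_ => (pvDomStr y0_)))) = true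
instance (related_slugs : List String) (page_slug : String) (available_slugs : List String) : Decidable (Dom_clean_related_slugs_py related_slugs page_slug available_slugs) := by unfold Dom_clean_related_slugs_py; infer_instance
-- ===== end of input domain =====

-- B replaces A's accumulator loop (skip/append, output-membership dedup, early break at 6) by a
-- budgeted recursion that, when it keeps an element, filters all its future duplicates out of the
-- remaining tail — an alternative decomposition of the same task, same cost.


-- ===== PORT A =====
-- MAX_RELATED_SLUGS = 6
def pvMaxRelatedSlugs : Nat := 6

-- the for-loop of A: state is the accumulator `clean`; `break` = returning the accumulator
def cleanGo (page_slug : String) (available_slugs : List String) : List String → List String → List String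
  | [], clean => clean
  | related_slug :: rest, clean =>
    if related_slug = page_slug ∨ related_slug ∉ available_slugs ∨ related_slug ∈ clean then
      cleanGo page_slug available_slugs rest clean
    else
      let clean' := clean ++ [related_slug]
      if clean'.length = pvMaxRelatedSlugs then clean'
      else cleanGo page_slug available_slugs rest clean'

def clean_related_slugs_py (related_slugs : List String) (page_slug : String) (available_slugs : List String) : List String :=
  cleanGo page_slug available_slugs related_slugs []

-- ===== PORT B =====
-- B's inner recursive `go(rest, budget)`: no accumulator; a kept head has its duplicates
-- filtered out of the tail, and the budget counts how many elements may still be emitted.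
def altGo (page_slug : String) (available_slugs : List String) : List String → Nat → List String
  | _, 0 => []
  | [], _ + 1 => []
  | head :: tail, b + 1 =>
    if head = page_slug ∨ head ∉ available_slugs then
      altGo page_slug available_slugs tail (b + 1)
    else
      head :: altGo page_slug available_slugs (tail.filter (fun s => s ≠ head)) b
termination_by l _ => l.length
decreasing_by
  · simp
  · simp only [List.length_unattach, List.length_cons]
    exact Nat.lt_succ_of_le (le_trans (List.length_filter_le _ _) (by simp))

def clean_related_slugs_py_alt (related_slugs : List String) (page_slug : String) (available_slugs : List String) : List String :=
  altGo page_slug available_slugs related_slugs 6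

-- ===== PRECONDITION & SPEC =====
def Spec_clean_related_slugs_py (related_slugs : List String) (page_slug : String) (available_slugs : List String) (out : List String) : Prop := out = clean_related_slugs_py_alt related_slugs page_slug available_slugs
instance (related_slugs : List String) (page_slug : String) (available_slugs : List String) (out : List String) : Decidable (Spec_clean_related_slugs_py related_slugs page_slug available_slugs out) := by unfold Spec_clean_related_slugs_py; infer_instance

-- ===== CLAIM (what is proved, stated in full; the proofs are below) =====
def Claim_equal_clean_related_slugs_py : Prop := ∀ (related_slugs : List String) (page_slug : String) (available_slugs : List String), Dom_clean_related_slugs_py related_slugs page_slug available_slugs → Spec_clean_related_slugs_py related_slugs page_slug available_slugs (clean_related_slugs_py related_slugs page_slug available_slugs)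

-- ===== LEMMAS AND PROOFS =====

-- invariant of A's loop: with |clean| < 6 emitted so far, A's loop appends to `clean` exactly what
-- B's recursion produces from the remainder with the already-emitted elements filtered away and
-- the remaining budget 6 - |clean|.
lemma cleanGo_eq_altGo (page_slug : String) (available_slugs : List String) :
    ∀ (rel clean : List String), clean.length < 6 →
      cleanGo page_slug available_slugs rel clean =
        clean ++ altGo page_slug available_slugs
          (rel.filter (fun s => s ∉ clean)) (6 - clean.length) := by
  intro rel
  induction rel with
  | nil =>
    intro clean h
    obtain ⟨b, hb⟩ : ∃ b, 6 - clean.length = b + 1 := ⟨5 - clean.length, by omega⟩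
    simp [cleanGo, hb, altGo]
  | cons s rest ih =>
    intro clean h
    obtain ⟨b, hb⟩ : ∃ b, 6 - clean.length = b + 1 := ⟨5 - clean.length, by omega⟩
    by_cases hm : s ∈ clean
    · have hfil : (s :: rest).filter (fun s => s ∉ clean) =
          rest.filter (fun s => s ∉ clean) := List.filter_cons_of_neg (by simp [hm])
      rw [hfil, show cleanGo page_slug available_slugs (s :: rest) clean =
            cleanGo page_slug available_slugs rest clean from by
          simp only [cleanGo]; rw [if_pos (by tauto)]]
      exact ih clean h
    · have hfil : (s :: rest).filter (fun s => s ∉ clean) =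
          s :: rest.filter (fun s => s ∉ clean) := List.filter_cons_of_pos (by simp [hm])
      by_cases hp : s = page_slug ∨ s ∉ available_slugs
      · rw [hfil, hb]
        rw [show altGo page_slug available_slugs (s :: rest.filter (fun s => s ∉ clean)) (b + 1) =
              altGo page_slug available_slugs (rest.filter (fun s => s ∉ clean)) (b + 1) from by
            simp only [altGo]; rw [if_pos hp]]
        rw [show cleanGo page_slug available_slugs (s :: rest) clean =
              cleanGo page_slug available_slugs rest clean from by
            simp only [cleanGo]; rw [if_pos (by tauto)]]
        rw [← hb]
        exact ih clean h
      · rw [not_or, not_not] at hp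
        have hA : cleanGo page_slug available_slugs (s :: rest) clean =
            (if (clean ++ [s]).length = pvMaxRelatedSlugs then clean ++ [s]
             else cleanGo page_slug available_slugs rest (clean ++ [s])) := by
          simp only [cleanGo]; rw [if_neg (by tauto)]
        have hB : altGo page_slug available_slugs (s :: rest.filter (fun s => s ∉ clean)) (b + 1) =
            s :: altGo page_slug available_slugs
              ((rest.filter (fun s => s ∉ clean)).filter (fun s' => s' ≠ s)) b := by
          simp only [altGo]; rw [if_neg (by tauto)]
        have hff : (rest.filter (fun s => s ∉ clean)).filter (fun s' => s' ≠ s) =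
            rest.filter (fun s' => s' ∉ clean ++ [s]) := by
          rw [List.filter_filter]
          apply List.filter_congr
          intro x _
          simp [List.mem_append, and_comm]
        rw [hfil, hb, hB, hff, hA]
        by_cases h6 : (clean ++ [s]).length = pvMaxRelatedSlugs
        · have hb0 : b = 0 := by
            simp only [pvMaxRelatedSlugs, List.length_append, List.length_cons,
              List.length_nil] at h6
            omega
          rw [if_pos h6, hb0]
          simp [altGo]
        · have hlt : (clean ++ [s]).length < 6 := by
            simp only [pvMaxRelatedSlugs, List.length_append, List.length_cons,
              List.length_nil] at h6 ⊢
            omega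
          rw [if_neg h6, ih (clean ++ [s]) hlt]
          have hb' : 6 - (clean ++ [s]).length = b := by
            simp only [List.length_append, List.length_cons, List.length_nil]
            omega
          rw [hb']
          simp

-- ===== VERDICT (by name: the statement is the Claim_ definition above) =====
theorem clean_related_slugs_py_spec : Claim_equal_clean_related_slugs_py := by
  intro related_slugs page_slug available_slugs _
  unfold Spec_clean_related_slugs_py clean_related_slugs_py clean_related_slugs_py_alt
  simpa using cleanGo_eq_altGo page_slug available_slugs related_slugs [] (by simp)
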